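-- pv_equiv track=rewrite | github.com/Latent-Fields/REE_assembly | evidence/planning/scripts/apply_adjudication_cascade.py | _block_insert_index
-- ===== SOURCE A (Python) =====
-- def _block_insert_index(block_lines: list[str], anchor_keys: list[str]) -> int:
--     for key in anchor_keys:
--         prefix = f"  {key}:"
--         for idx, line in enumerate(block_lines):
--             if line.startswith(prefix):
--                 j = idx + 1
--                 while j < len(block_lines) and block_lines[j].startswith("    - "):
--                     j += 1
--                 return j
--     return 1
-- ===== SOURCE B (Python) =====
-- def _block_insert_index(block_lines: list[str], anchor_keys: list[str]) -> int:
--     # One pass: index every candidate anchor key (text between the two leading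
--     # spaces and any colon) to its first line index, then one priority lookup.
--     first = {}
--     for idx, line in enumerate(block_lines):
--         if line.startswith("  "):
--             for p, ch in enumerate(line):
--                 if ch == ":" and p >= 2:
--                     key = line[2:p]
--                     if key not in first:
--                         first[key] = idx
--     for key in anchor_keys:
--         if key in first:
--             j = first[key] + 1
--             while j < len(block_lines) and block_lines[j].startswith("    - "):
--                 j += 1
--             return j
--     return 1
-- ===== Notes on version B (the rewrite author's own statement) =====
-- stated objective: faster
-- what changed: Replaces A's per-anchor-key rescans of block_lines with a single pass that builds a dict from every candidate key (text between the two leading spaces and a colon) to its first line index, followed by one O(1) lookup per anchor key in priority order.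
import Mathlib
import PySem

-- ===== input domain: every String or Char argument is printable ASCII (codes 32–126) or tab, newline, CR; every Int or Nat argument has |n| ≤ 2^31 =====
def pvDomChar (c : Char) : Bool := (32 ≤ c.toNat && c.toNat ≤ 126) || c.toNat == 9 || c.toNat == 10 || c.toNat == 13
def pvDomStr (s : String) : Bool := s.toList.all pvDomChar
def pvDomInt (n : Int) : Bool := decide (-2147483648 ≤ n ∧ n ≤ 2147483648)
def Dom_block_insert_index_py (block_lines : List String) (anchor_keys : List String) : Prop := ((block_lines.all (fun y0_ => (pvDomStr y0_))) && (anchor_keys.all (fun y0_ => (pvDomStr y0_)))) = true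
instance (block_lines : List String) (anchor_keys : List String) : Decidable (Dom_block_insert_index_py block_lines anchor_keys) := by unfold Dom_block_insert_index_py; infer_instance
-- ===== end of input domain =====

-- B builds a first-index table of candidate keys in one pass over the lines, then does one
-- dict lookup per anchor key, instead of A's rescan of all lines for every anchor key
-- (objective: faster, measured).

-- Shared helper: the trailing `while j < len and block_lines[j].startswith("    - ")` loop,
-- identical in both Pythons.
def pvSkipDash (bls : List String) (j : Nat) : Nat :=
  if h : j < bls.length then
    if PySem.Chars.startswith (bls.getD j "").toList ("    - ".toList) then
      pvSkipDash bls (j + 1)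
    else j
  else j
termination_by bls.length - j

-- ===== PORT A =====
-- inner `for idx, line in enumerate(block_lines): if line.startswith(prefix): …`
def pvScanA (bls : List String) (pre : List Char) (idx : Nat) : Option Nat :=
  match bls with
  | [] => none
  | l :: ls => if PySem.Chars.startswith l.toList pre then some idx else pvScanA ls pre (idx + 1)

def pvOuterA (bls : List String) : List String → Int
  | [] => 1
  | k :: ks =>
      match pvScanA bls (' ' :: ' ' :: (k.toList ++ [':'])) 0 with
      | some idx => (pvSkipDash bls (idx + 1) : Int)
      | none => pvOuterA bls ks

def block_insert_index_py (block_lines : List String) (anchor_keys : List String) : Int :=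
  pvOuterA block_lines anchor_keys

-- ===== PORT B =====
-- inner `for p, ch in enumerate(line): if ch == ':' and p >= 2: …` of Source B; `rest` is the
-- unprocessed suffix of `line` starting at position p.
def pvAddCands (idx : Nat) (line : List Char) : List Char → Nat → PySem.Dict (List Char) Nat → PySem.Dict (List Char) Nat
  | [], _, d => d
  | c :: rest, p, d =>
      let d' :=
        if c = ':' ∧ 2 ≤ p then
          let key := (line.drop 2).take (p - 2)
          if d.contains key then d else d.insert key idx
        else d
      pvAddCands idx line rest (p + 1) d'

-- `for idx, line in enumerate(block_lines): if line.startswith("  "): …`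
def pvBuildB : List String → Nat → PySem.Dict (List Char) Nat → PySem.Dict (List Char) Nat
  | [], _, d => d
  | l :: ls, idx, d =>
      pvBuildB ls (idx + 1)
        (if PySem.Chars.startswith l.toList [' ', ' '] then pvAddCands idx l.toList l.toList 0 d else d)

-- `for key in anchor_keys: if key in first: …`
def pvLookupB (bls : List String) (d : PySem.Dict (List Char) Nat) : List String → Int
  | [] => 1
  | k :: ks =>
      match d.get? k.toList with
      | some idx => (pvSkipDash bls (idx + 1) : Int)
      | none => pvLookupB bls d ks

def block_insert_index_py_alt (block_lines : List String) (anchor_keys : List String) : Int :=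
  pvLookupB block_lines (pvBuildB block_lines 0 PySem.Dict.empty) anchor_keys

-- ===== PRECONDITION & SPEC =====
def Spec_block_insert_index_py (block_lines : List String) (anchor_keys : List String) (out : Int) : Prop := out = block_insert_index_py_alt block_lines anchor_keys
instance (block_lines : List String) (anchor_keys : List String) (out : Int) : Decidable (Spec_block_insert_index_py block_lines anchor_keys out) := by unfold Spec_block_insert_index_py; infer_instance

-- ===== CLAIM (what is proved, stated in full; the proofs are below) =====
def Claim_equal_block_insert_index_py : Prop := ∀ (block_lines : List String) (anchor_keys : List String), Dom_block_insert_index_py block_lines anchor_keys → Spec_block_insert_index_py block_lines anchor_keys (block_insert_index_py block_lines anchor_keys)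

-- ===== LEMMAS AND PROOFS =====

-- whether the part of `line` from position p on (given as `rest`) has a colon at some q ≥ 2
-- with line[2:q] = k; mirrors pvAddCands' recursion
def pvHasCand (line k : List Char) : List Char → Nat → Bool
  | [], _ => false
  | c :: rest, p =>
      (decide (c = ':' ∧ 2 ≤ p) && ((line.drop 2).take (p - 2) == k)) || pvHasCand line k rest (p + 1)

theorem pvAddCands_get? (idx : Nat) (line k : List Char) :
    ∀ (rest : List Char) (p : Nat) (d : PySem.Dict (List Char) Nat),
      (pvAddCands idx line rest p d).get? k =
        if pvHasCand line k rest p then some ((d.get? k).getD idx) else d.get? k := by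
  intro rest
  induction rest with
  | nil => intro p d; simp [pvAddCands, pvHasCand]
  | cons c rest ih =>
    intro p d
    simp only [pvAddCands, pvHasCand]
    rw [ih]
    by_cases hc : c = ':' ∧ 2 ≤ p
    · by_cases hk : (line.drop 2).take (p - 2) = k
      · subst hk
        cases hg : d.get? ((line.drop 2).take (p - 2)) with
        | none =>
          have hcon : d.contains ((line.drop 2).take (p - 2)) = false := by
            rw [PySem.Dict.contains_eq_isSome_get?, hg]; rfl
          rw [hcon]
          simp [hc, PySem.Dict.get?_insert_self]
        | some v =>
          have hcon : d.contains ((line.drop 2).take (p - 2)) = true := by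
            rw [PySem.Dict.contains_eq_isSome_get?, hg]; rfl
          rw [hcon]
          simp [hc, hg]
      · have hne : k ≠ (line.drop 2).take (p - 2) := fun h => hk h.symm
        have hd' : (if d.contains ((line.drop 2).take (p - 2)) then d
                    else d.insert ((line.drop 2).take (p - 2)) idx).get? k = d.get? k := by
          split
          · rfl
          · simp [PySem.Dict.get?_insert, hne]
        simp [hc, hk, hd']
    · simp [hc]

theorem pvHasCand_eq (line k : List Char) :
    ∀ (rest : List Char) (p : Nat), 2 ≤ p →
      (pvHasCand line k rest p = true ↔
        ∃ i, i < rest.length ∧ rest[i]? = some ':' ∧ (line.drop 2).take (p + i - 2) = k) := by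
  intro rest
  induction rest with
  | nil => intro p hp; simp [pvHasCand]
  | cons c rest ih =>
    intro p hp
    simp only [pvHasCand, Bool.or_eq_true, Bool.and_eq_true, decide_eq_true_eq, beq_iff_eq]
    rw [ih (p + 1) (by omega)]
    constructor
    · rintro (⟨⟨hc, -⟩, htake⟩ | ⟨i, hlt, hget, htake⟩)
      · exact ⟨0, by simp [hc, htake]⟩
      · refine ⟨i + 1, by simpa using hlt, by simpa using hget, ?_⟩
        have : p + (i + 1) - 2 = p + 1 + i - 2 := by omega
        rw [this]; exact htake
    · rintro ⟨i, hlt, hget, htake⟩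
      cases i with
      | zero =>
        left
        refine ⟨⟨by simpa using hget, hp⟩, by simpa using htake⟩
      | succ i =>
        right
        refine ⟨i, by simpa using hlt, by simpa using hget, ?_⟩
        have : p + 1 + i - 2 = p + (i + 1) - 2 := by omega
        rw [this]; exact htake

theorem pvPrefixColon (rest k : List Char) :
    (k ++ [':']) <+: rest ↔
      ∃ i, i < rest.length ∧ rest[i]? = some ':' ∧ rest.take i = k := by
  constructor
  · rintro ⟨t, ht⟩
    subst ht
    refine ⟨k.length, by simp, ?_, ?_⟩
    · rw [List.append_assoc, List.getElem?_append_right (le_refl _)]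
      simp
    · rw [List.append_assoc, List.take_append_of_le_length (le_refl _)]
      simp
  · rintro ⟨i, hlt, hget, htake⟩
    have hlen : k.length = i := by
      rw [← htake, List.length_take]; omega
    have hdrop : ∃ t, rest.drop i = ':' :: t := by
      cases hd : rest.drop i with
      | nil =>
        exfalso
        have : rest.length ≤ i := by
          have := congrArg List.length hd
          simp [List.length_drop] at this
          omega
        omega
      | cons x t =>
        have hx : rest[i]? = some x := by
          have h0 : (rest.drop i)[0]? = some x := by rw [hd]; rfl
          rw [List.getElem?_drop] at h0
          simp at h0; exact h0
        rw [hx] at hget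
        exact ⟨t, by simpa [Option.some_inj.mp hget] using hd⟩
    rcases hdrop with ⟨t, htail⟩
    refine ⟨t, ?_⟩
    calc k ++ [':'] ++ t = k ++ (':' :: t) := by simp
    _ = rest.take i ++ rest.drop i := by rw [htake, htail]
    _ = rest := List.take_append_drop i rest

theorem pvHasCand_two_spaces (k t : List Char) :
    pvHasCand (' ' :: ' ' :: t) k (' ' :: ' ' :: t) 0 = pvHasCand (' ' :: ' ' :: t) k t 2 := by
  simp [pvHasCand]

theorem pvLine_eq (line k : List Char) :
    (PySem.Chars.startswith line [' ', ' '] && pvHasCand line k line 0) =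
      PySem.Chars.startswith line (' ' :: ' ' :: (k ++ [':'])) := by
  rw [Bool.eq_iff_iff, Bool.and_eq_true, PySem.Chars.startswith_iff, PySem.Chars.startswith_iff]
  match line with
  | [] => simp
  | [a] => simp [List.cons_prefix_cons]
  | a :: b :: t =>
    rw [List.cons_prefix_cons, List.cons_prefix_cons, List.cons_prefix_cons, List.cons_prefix_cons]
    constructor
    · rintro ⟨⟨ha, hb, -⟩, hcand⟩
      subst ha; subst hb
      rw [pvHasCand_two_spaces] at hcand
      rw [pvHasCand_eq _ _ t 2 (by omega)] at hcand
      rcases hcand with ⟨i, hlt, hget, htake⟩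
      refine ⟨rfl, rfl, ?_⟩
      rw [pvPrefixColon]
      exact ⟨i, hlt, hget, by simpa using htake⟩
    · rintro ⟨ha, hb, hpre⟩
      subst ha; subst hb
      rw [pvPrefixColon] at hpre
      rcases hpre with ⟨i, hlt, hget, htake⟩
      refine ⟨⟨rfl, rfl, List.nil_prefix⟩, ?_⟩
      rw [pvHasCand_two_spaces, pvHasCand_eq _ _ t 2 (by omega)]
      exact ⟨i, hlt, hget, by simpa using htake⟩

theorem pvBuildB_get? (k : List Char) :
    ∀ (bls : List String) (idx : Nat) (d : PySem.Dict (List Char) Nat),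
      (pvBuildB bls idx d).get? k =
        (d.get? k).or (pvScanA bls (' ' :: ' ' :: (k ++ [':'])) idx) := by
  intro bls
  induction bls with
  | nil => intro idx d; simp [pvBuildB, pvScanA]
  | cons l ls ih =>
    intro idx d
    simp only [pvBuildB, pvScanA]
    rw [ih]
    have hd' : (if PySem.Chars.startswith l.toList [' ', ' '] then pvAddCands idx l.toList l.toList 0 d
                else d).get? k =
        if PySem.Chars.startswith l.toList (' ' :: ' ' :: (k ++ [':'])) then
          some ((d.get? k).getD idx) else d.get? k := by
      rw [← pvLine_eq]
      by_cases hsw : PySem.Chars.startswith l.toList [' ', ' '] = true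
      · rw [if_pos hsw, pvAddCands_get?]
        simp [hsw]
      · have hsw' : PySem.Chars.startswith l.toList [' ', ' '] = false := by
          simpa using hsw
        simp [hsw']
    rw [hd']
    by_cases hsw : PySem.Chars.startswith l.toList (' ' :: ' ' :: (k ++ [':'])) = true
    · rw [if_pos hsw, if_pos hsw]
      cases d.get? k <;> simp
    · have hsw' : PySem.Chars.startswith l.toList (' ' :: ' ' :: (k ++ [':'])) = false := by
        simpa using hsw
      simp [hsw']

theorem pvOuter_eq (bls : List String) :
    ∀ (ks : List String), pvOuterA bls ks = pvLookupB bls (pvBuildB bls 0 PySem.Dict.empty) ks := by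
  intro ks
  induction ks with
  | nil => simp [pvOuterA, pvLookupB]
  | cons key ks ih =>
    simp only [pvOuterA, pvLookupB]
    rw [pvBuildB_get?, PySem.Dict.get?_empty, Option.none_or]
    cases pvScanA bls (' ' :: ' ' :: (key.toList ++ [':'])) 0 with
    | none => exact ih
    | some idx => rfl

-- ===== VERDICT (by name: the statement is the Claim_ definition above) =====
theorem block_insert_index_py_spec : Claim_equal_block_insert_index_py := by
  intro bls ks _
  unfold Spec_block_insert_index_py block_insert_index_py block_insert_index_py_alt
  exact pvOuter_eq bls ks
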